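-- pv_equiv track=rewrite | github.com/webcomponents/webcomponents.org | src/versiontag.py | default_version
-- ===== SOURCE A (Python) =====
-- def is_prerelease(tag):
--   return '-' in tag
--
-- def default_version(versions):
--   """Returns the default version - the latest stable version,
--   or the latests pre-release if all versions are pre-release.
--   Assumes input is sorted.
--   """
--   prerelease_result = None
--   version_result = None
--   for version in versions:
--     if is_prerelease(version):
--       prerelease_result = version
--     else:
--       version_result = version
--   if version_result is None:
--     version_result = prerelease_result
--   return version_result
-- ===== SOURCE B (Python) =====
-- def default_version(versions):
--   for v in reversed(versions):
--     if '-' not in v: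
--       return v
--   return versions[-1] if versions else None
-- ===== Notes on version B (the rewrite author's own statement) =====
-- stated objective: simpler
-- what changed: Replaces the forward pass maintaining both last-stable and last-prerelease accumulators with a backward scan that early-returns the first stable version, falling back to the last element when none is stable.
import Mathlib
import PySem

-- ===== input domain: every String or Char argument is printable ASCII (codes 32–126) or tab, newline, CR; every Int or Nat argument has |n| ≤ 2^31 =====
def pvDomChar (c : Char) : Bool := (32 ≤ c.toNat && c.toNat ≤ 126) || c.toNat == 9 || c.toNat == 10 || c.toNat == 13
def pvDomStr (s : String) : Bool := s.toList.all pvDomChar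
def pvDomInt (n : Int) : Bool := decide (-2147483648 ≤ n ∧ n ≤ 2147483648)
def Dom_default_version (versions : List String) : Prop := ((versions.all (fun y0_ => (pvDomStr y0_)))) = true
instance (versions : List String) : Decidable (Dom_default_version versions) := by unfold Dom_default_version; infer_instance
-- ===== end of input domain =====

-- B replaces A's forward pass with two accumulators by a backward scan with early return (objective: simpler).

-- ===== PORT A =====
def is_prerelease (tag : String) : Bool := PySem.Str.isIn "-" tag

def dvStep (st : Option String × Option String) (version : String) : Option String × Option String :=
  if is_prerelease version then (some version, st.2) else (st.1, some version)

def default_version (versions : List String) : Option String :=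
  let st := versions.foldl dvStep (none, none)
  match st.2 with
  | none => st.1
  | some v => some v

-- ===== PORT B =====
-- the reversed-order loop with early return: first element of the reversed list that is stable
def dvFindStable : List String → Option String
  | [] => none
  | v :: rest => if !is_prerelease v then some v else dvFindStable rest

def default_version_alt (versions : List String) : Option String :=
  match dvFindStable versions.reverse with
  | some v => some v
  | none => if versions.isEmpty then none else PySem.List.pyGet? versions (-1)

-- ===== PRECONDITION & SPEC =====
def Spec_default_version (versions : List String) (out : Option String) : Prop := out = default_version_alt versions
instance (versions : List String) (out : Option String) : Decidable (Spec_default_version versions out) := by unfold Spec_default_version; infer_instance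

-- ===== CLAIM (what is proved, stated in full; the proofs are below) =====
def Claim_equal_default_version : Prop := ∀ (versions : List String), Dom_default_version versions → Spec_default_version versions (default_version versions)

-- ===== LEMMAS AND PROOFS =====

-- the second accumulator of A's loop is the last stable version (or the initial value)
theorem dv_snd (ys : List String) (st : Option String × Option String) :
    (ys.foldl dvStep st).2 =
      match dvFindStable ys.reverse with
      | some v => some v
      | none => st.2 := by
  induction ys using List.reverseRecOn generalizing st with
  | nil => rfl
  | append_singleton ys y ih =>
      rw [List.foldl_append, List.reverse_append]
      simp only [List.foldl, List.reverse_singleton, List.singleton_append, dvFindStable, dvStep]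
      by_cases h : is_prerelease y
      · simp [h, ih]
      · simp [h]

-- when no element is stable, the first accumulator ends as the last element (or the initial value)
theorem dv_fst (ys : List String) (st : Option String × Option String)
    (h : dvFindStable ys.reverse = none) :
    (ys.foldl dvStep st).1 =
      match ys.reverse.head? with
      | some v => some v
      | none => st.1 := by
  induction ys using List.reverseRecOn generalizing st with
  | nil => rfl
  | append_singleton ys y ih =>
      rw [List.reverse_append, List.reverse_singleton, List.singleton_append] at h
      simp only [dvFindStable] at h
      by_cases hy : is_prerelease y
      · rw [List.foldl_append, List.reverse_append]
        simp [dvStep, hy]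
      · simp [hy] at h

theorem pyGet_neg_one (versions : List String) (h : versions ≠ []) :
    PySem.List.pyGet? versions (-1) = versions.reverse.head? := by
  simp [PySem.List.pyGet?, PySem.List.pyIdx?]
  have hlen : 0 < versions.length := List.length_pos_iff.mpr h
  have h1 : ¬ ((-1 : Int) + versions.length < 0) := by omega
  have h2 : (-1 + (versions.length : Int)).toNat = versions.length - 1 := by omega
  rw [if_pos (by omega : 1 ≤ versions.length)]
  simp [List.getElem?_eq_getElem (by omega : versions.length - 1 < versions.length), List.getLast?_eq_getElem?]

-- ===== VERDICT (by name: the statement is the Claim_ definition above) =====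
theorem default_version_spec : Claim_equal_default_version := by
  intro versions _
  unfold Spec_default_version default_version default_version_alt
  dsimp only
  rw [dv_snd]
  cases hf : dvFindStable versions.reverse with
  | some v => simp
  | none =>
      simp only
      rcases eq_or_ne versions [] with rfl | hne
      · rfl
      · rw [dv_fst versions _ hf, pyGet_neg_one versions hne]
        have hr : versions.reverse ≠ [] := by simpa using hne
        rcases List.exists_cons_of_ne_nil hr with ⟨a, t, ht⟩
        simp [ht, List.isEmpty_iff, hne]
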